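-- pv_equiv track=rewrite | github.com/plc1220/HelpUDoc | agent/helpudoc_agent/skills_registry.py | expand_runtime_tool_names
-- ===== SOURCE A (Python) =====
-- from typing import Any, Iterable, List
--
-- TOOL_FACTORY_EXPANSIONS: dict[str, tuple[str, ...]] = {
--     "data_agent_tools": (
--         "get_table_schema",
--         "run_sql_query",
--         "materialize_bigquery_to_parquet",
--         "generate_chart_config",
--         "generate_summary",
--         "generate_dashboard",
--     ),
-- }
--
-- def expand_runtime_tool_names(tool_names: Iterable[str]) -> List[str]:
--     seen: set[str] = set()
--     expanded: List[str] = []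
--     for raw_tool_name in tool_names:
--         tool_name = str(raw_tool_name or "").strip()
--         if not tool_name:
--             continue
--         if tool_name not in seen:
--             seen.add(tool_name)
--             expanded.append(tool_name)
--         for runtime_tool_name in TOOL_FACTORY_EXPANSIONS.get(tool_name, ()):
--             if runtime_tool_name in seen:
--                 continue
--             seen.add(runtime_tool_name)
--             expanded.append(runtime_tool_name)
--     return expanded
-- ===== SOURCE B (Python) =====
-- from typing import Any, Iterable, List
--
-- TOOL_FACTORY_EXPANSIONS: dict[str, tuple[str, ...]] = {
--     "data_agent_tools": (
--         "get_table_schema",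
--         "run_sql_query",
--         "materialize_bigquery_to_parquet",
--         "generate_chart_config",
--         "generate_summary",
--         "generate_dashboard",
--     ),
-- }
--
-- def expand_runtime_tool_names(tool_names: Iterable[str]) -> List[str]:
--     # pass 1: flatten into the raw candidate stream (stripped name, then its expansions)
--     candidates: List[str] = []
--     for raw_tool_name in tool_names:
--         tool_name = str(raw_tool_name or "").strip()
--         if tool_name:
--             candidates.append(tool_name)
--             candidates.extend(TOOL_FACTORY_EXPANSIONS.get(tool_name, ()))
--     # pass 2: backward overwrite pass leaves each name mapped to its FIRST index
--     first: dict = {}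
--     for i, c in reversed(list(enumerate(candidates))):
--         first[c] = i
--     # the distinct names, ordered by first occurrence
--     return sorted(first, key=first.get)
-- ===== Notes on version B (the rewrite author's own statement) =====
-- stated objective: alternative
-- what changed: Instead of A's single forward pass with a seen-set, B first flattens every stripped name with its factory expansions into one candidate list, then computes each name's first-occurrence index by a backward overwrite pass over the reversed enumeration, and finally returns the distinct names sorted by that index - no membership test at all, dedup falls out of index overwriting plus sorting.
import Mathlib
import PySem

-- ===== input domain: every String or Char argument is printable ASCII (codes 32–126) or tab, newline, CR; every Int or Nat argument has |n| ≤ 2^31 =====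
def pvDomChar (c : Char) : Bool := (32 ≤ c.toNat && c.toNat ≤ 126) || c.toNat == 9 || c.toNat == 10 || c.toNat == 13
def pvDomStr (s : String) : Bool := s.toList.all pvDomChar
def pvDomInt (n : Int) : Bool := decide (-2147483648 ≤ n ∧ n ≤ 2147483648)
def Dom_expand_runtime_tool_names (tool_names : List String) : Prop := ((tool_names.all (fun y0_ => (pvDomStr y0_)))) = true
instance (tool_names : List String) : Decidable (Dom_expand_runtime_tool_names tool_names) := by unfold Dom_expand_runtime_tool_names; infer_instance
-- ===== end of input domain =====

-- B replaces A's interleaved seen-set pass by staged passes: flatten the candidate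
-- stream, map every name to its first-occurrence index by a backward overwrite pass,
-- and sort the distinct names by that index; objective: alternative algorithm.


-- TOOL_FACTORY_EXPANSIONS.get(t, ()) (shared module constant)
def tfExpansions (t : String) : List String :=
  PySem.Dict.getD
    (PySem.Dict.ofList [("data_agent_tools",
      ["get_table_schema", "run_sql_query", "materialize_bigquery_to_parquet",
       "generate_chart_config", "generate_summary", "generate_dashboard"])]) t []

-- ===== PORT A =====
-- state: (seen : PySem.Set String, expanded : List String); branches in A's order
def expand_runtime_tool_names (tool_names : List String) : List String :=
  (tool_names.foldl
    (fun (st : PySem.Set String × List String) raw_tool_name =>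
      let tool_name := PySem.Str.strip (if raw_tool_name = "" then "" else raw_tool_name)
      if tool_name = "" then st
      else
        let st1 :=
          if PySem.Set.contains st.1 tool_name then st
          else (PySem.Set.add st.1 tool_name, st.2 ++ [tool_name])
        (tfExpansions tool_name).foldl
          (fun (st2 : PySem.Set String × List String) runtime_tool_name =>
            if PySem.Set.contains st2.1 runtime_tool_name then st2
            else (PySem.Set.add st2.1 runtime_tool_name, st2.2 ++ [runtime_tool_name]))
          st1)
    (PySem.Set.empty, [])).2

-- ===== PORT B =====
-- pass 1 builds the candidate list; pass 2 is the backward overwrite loop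
-- 'for i, c in reversed(list(enumerate(candidates))): first[c] = i';
-- then 'sorted(first, key=first.get)' (every key is present, so first.get = getD _ 0)
def expand_runtime_tool_names_alt (tool_names : List String) : List String :=
  let candidates :=
    tool_names.foldl
      (fun (candidates : List String) raw_tool_name =>
        let tool_name := PySem.Str.strip (if raw_tool_name = "" then "" else raw_tool_name)
        if tool_name = "" then candidates
        else candidates ++ tool_name :: tfExpansions tool_name)
      []
  let first :=
    ((PySem.List.enumerate candidates).reverse).foldl
      (fun (d : PySem.Dict String Int) p => d.insert p.2 p.1) PySem.Dict.empty
  PySem.List.sorted first.keys (fun k => first.getD k 0)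

-- ===== PRECONDITION & SPEC =====
def Spec_expand_runtime_tool_names (tool_names : List String) (out : List String) : Prop := out = expand_runtime_tool_names_alt tool_names
instance (tool_names : List String) (out : List String) : Decidable (Spec_expand_runtime_tool_names tool_names out) := by unfold Spec_expand_runtime_tool_names; infer_instance

-- ===== CLAIM (what is proved, stated in full; the proofs are below) =====
def Claim_equal_expand_runtime_tool_names : Prop := ∀ (tool_names : List String), Dom_expand_runtime_tool_names tool_names → Spec_expand_runtime_tool_names tool_names (expand_runtime_tool_names tool_names)

-- ===== LEMMAS AND PROOFS =====

-- the candidate group contributed by one raw name (proof-only abbreviation)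
def pvCandidates (raw_tool_name : String) : List String :=
  let tool_name := PySem.Str.strip (if raw_tool_name = "" then "" else raw_tool_name)
  if tool_name = "" then [] else tool_name :: tfExpansions tool_name

-- A's per-element step keeps 'seen' and 'expanded' identical and both equal to Set.add
theorem pv_step_diag (s : PySem.Set String) (x : String) :
    (if PySem.Set.contains s x then ((s, s) : PySem.Set String × List String)
     else (PySem.Set.add s x, s ++ [x]))
    = (PySem.Set.add s x, PySem.Set.add s x) := by
  simp only [PySem.Set.add]
  split_ifs <;> rfl

theorem pv_inner_diag (l : List String) (s : PySem.Set String) :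
    l.foldl
      (fun (st2 : PySem.Set String × List String) x =>
        if PySem.Set.contains st2.1 x then st2
        else (PySem.Set.add st2.1 x, st2.2 ++ [x]))
      (s, s)
    = (l.foldl PySem.Set.add s, l.foldl PySem.Set.add s) := by
  induction l generalizing s with
  | nil => rfl
  | cons x xs ih =>
    simp only [List.foldl_cons]
    rw [show (if PySem.Set.contains (s, (s : List String)).1 x then ((s, s) : PySem.Set String × List String)
         else (PySem.Set.add (s, (s : List String)).1 x, (s, (s : List String)).2 ++ [x]))
        = (PySem.Set.add s x, PySem.Set.add s x) from pv_step_diag s x]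
    exact ih _

-- A's outer step from a diagonal state folds Set.add over the candidate list
theorem pv_outer_diag (l : List String) (s : PySem.Set String) :
    l.foldl
      (fun (st : PySem.Set String × List String) raw =>
        let t := PySem.Str.strip (if raw = "" then "" else raw)
        if t = "" then st
        else
          let st1 :=
            if PySem.Set.contains st.1 t then st
            else (PySem.Set.add st.1 t, st.2 ++ [t])
          (tfExpansions t).foldl
            (fun (st2 : PySem.Set String × List String) x =>
              if PySem.Set.contains st2.1 x then st2
              else (PySem.Set.add st2.1 x, st2.2 ++ [x]))
            st1)
      (s, s)
    = (l.foldl (fun s raw => (pvCandidates raw).foldl PySem.Set.add s) s,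
       l.foldl (fun s raw => (pvCandidates raw).foldl PySem.Set.add s) s) := by
  induction l generalizing s with
  | nil => rfl
  | cons raw xs ih =>
    simp only [List.foldl_cons, pvCandidates]
    by_cases h : PySem.Str.strip (if raw = "" then "" else raw) = ""
    · simp only [h]
      exact ih s
    · simp only [if_neg h]
      rw [show (if PySem.Set.contains (s, (s : List String)).1
            (PySem.Str.strip (if raw = "" then "" else raw)) then ((s, s) : PySem.Set String × List String)
           else (PySem.Set.add (s, (s : List String)).1 (PySem.Str.strip (if raw = "" then "" else raw)),
                 (s, (s : List String)).2 ++ [PySem.Str.strip (if raw = "" then "" else raw)]))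
          = (PySem.Set.add s (PySem.Str.strip (if raw = "" then "" else raw)),
             PySem.Set.add s (PySem.Str.strip (if raw = "" then "" else raw))) from pv_step_diag s _]
      rw [pv_inner_diag]
      simp only [List.foldl_cons]
      exact ih _

-- folding Set.add group-by-group equals folding it over the flattened stream
theorem pv_foldl_flatMap (l : List String) (s : PySem.Set String) :
    l.foldl (fun s raw => (pvCandidates raw).foldl PySem.Set.add s) s
    = (l.flatMap pvCandidates).foldl PySem.Set.add s := by
  induction l generalizing s with
  | nil => rfl
  | cons x xs ih => simp [List.foldl_append, ih]

-- B's pass-1 fold builds exactly the flattened candidate stream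
theorem pv_b_flatten (l : List String) (acc : List String) :
    l.foldl
      (fun (candidates : List String) raw =>
        let t := PySem.Str.strip (if raw = "" then "" else raw)
        if t = "" then candidates
        else candidates ++ t :: tfExpansions t)
      acc
    = acc ++ l.flatMap pvCandidates := by
  induction l generalizing acc with
  | nil => simp
  | cons raw xs ih =>
    simp only [List.foldl_cons, List.flatMap_cons, pvCandidates]
    by_cases h : PySem.Str.strip (if raw = "" then "" else raw) = ""
    · simp [h, ih]
    · simp [h, ih, List.append_assoc]

-- the backward fold over 'enumerate', peeled one element at a time
theorem pv_build_cons (c : String) (xs : List String) (s : Int) (d0 : PySem.Dict String Int) :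
    ((PySem.List.enumerate (c :: xs) s).reverse).foldl
      (fun (d : PySem.Dict String Int) p => d.insert p.2 p.1) d0
    = (((PySem.List.enumerate xs (s + 1)).reverse).foldl
        (fun (d : PySem.Dict String Int) p => d.insert p.2 p.1) d0).insert c s := by
  rw [PySem.List.enumerate_cons, List.reverse_cons, List.foldl_append]
  rfl

-- the backward overwrite pass maps each name to its FIRST index in the list
theorem pv_build_get? (xs : List String) (s : Int) (d0 : PySem.Dict String Int) (k : String) :
    (((PySem.List.enumerate xs s).reverse).foldl
      (fun (d : PySem.Dict String Int) p => d.insert p.2 p.1) d0).get? k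
    = if k ∈ xs then some (s + (xs.idxOf k : Int)) else d0.get? k := by
  induction xs generalizing s with
  | nil => simp [PySem.List.enumerate]
  | cons c xs ih =>
    rw [pv_build_cons, PySem.Dict.get?_insert]
    by_cases h : k = c
    · subst h
      simp [List.idxOf_cons_self]
    · rw [if_neg h, ih, List.idxOf_cons_ne xs (fun hc => h hc.symm)]
      by_cases hm : k ∈ xs
      · simp only [hm, if_true, List.mem_cons, h, false_or]
        congr 1
        push_cast
        ring
      · simp [hm, h]

-- keys of the built dict = the names occurring in the list (plus d0's keys)
theorem pv_build_mem_keys (xs : List String) (s : Int) (d0 : PySem.Dict String Int) (k : String) :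
    k ∈ (((PySem.List.enumerate xs s).reverse).foldl
      (fun (d : PySem.Dict String Int) p => d.insert p.2 p.1) d0).keys
    ↔ k ∈ xs ∨ k ∈ d0.keys := by
  induction xs generalizing s with
  | nil => simp [PySem.List.enumerate]
  | cons c xs ih =>
    rw [pv_build_cons, PySem.Dict.mem_keys_insert, ih]
    simp [List.mem_cons]
    tauto

theorem pv_build_nodup_keys (xs : List String) (s : Int) (d0 : PySem.Dict String Int)
    (h : d0.keys.Nodup) :
    (((PySem.List.enumerate xs s).reverse).foldl
      (fun (d : PySem.Dict String Int) p => d.insert p.2 p.1) d0).keys.Nodup := by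
  induction xs generalizing s with
  | nil => simpa [PySem.List.enumerate] using h
  | cons c xs ih =>
    rw [pv_build_cons]
    exact PySem.Dict.nodup_keys_insert _ _ _ (ih _)

-- first-occurrence dedup lists its elements in strictly increasing first-index order
theorem pv_pairwise_idxOf (xs : List String) :
    (PySem.Set.ofList xs).Pairwise (fun a b => xs.idxOf a < xs.idxOf b) := by
  induction xs with
  | nil => exact List.Pairwise.nil
  | cons x xs ih =>
    rw [PySem.Set.ofList_cons, List.pairwise_cons]
    constructor
    · intro b hb
      obtain ⟨_, hbx⟩ := (PySem.Set.mem_discard _ _ _).1 hb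
      rw [List.idxOf_cons_self, List.idxOf_cons_ne xs (fun hc => hbx hc.symm)]
      exact Nat.succ_pos _
    · have hsub : ((PySem.Set.ofList xs).discard x).Sublist (PySem.Set.ofList xs) :=
        List.filter_sublist
      refine List.Pairwise.imp_of_mem ?_ (List.Pairwise.sublist hsub ih)
      intro a b ha hb hab
      obtain ⟨_, hax⟩ := (PySem.Set.mem_discard _ _ _).1 ha
      obtain ⟨_, hbx⟩ := (PySem.Set.mem_discard _ _ _).1 hb
      rw [List.idxOf_cons_ne xs (fun hc => hax hc.symm),
        List.idxOf_cons_ne xs (fun hc => hbx hc.symm)]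
      exact Nat.succ_lt_succ hab

-- ===== VERDICT (by name: the statement is the Claim_ definition above) =====
theorem expand_runtime_tool_names_spec : Claim_equal_expand_runtime_tool_names := by
  intro tool_names _
  unfold Spec_expand_runtime_tool_names expand_runtime_tool_names expand_runtime_tool_names_alt
  rw [show (PySem.Set.empty, ([] : List String)) = (([] : PySem.Set String), ([] : List String)) from rfl]
  rw [pv_outer_diag, pv_foldl_flatMap, pv_b_flatten, List.nil_append, ← PySem.Set.ofList_eq_foldl]
  set cands := tool_names.flatMap pvCandidates with hcands
  set first :=
    ((PySem.List.enumerate cands).reverse).foldl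
      (fun (d : PySem.Dict String Int) p => d.insert p.2 p.1) PySem.Dict.empty with hfirst
  have hperm : (PySem.Set.ofList cands).Perm first.keys := by
    refine (List.perm_ext_iff_of_nodup (PySem.Set.nodup_ofList _) ?_).mpr ?_
    · exact pv_build_nodup_keys _ _ _ PySem.Dict.nodup_keys_empty
    · intro a
      rw [PySem.Set.mem_ofList, hfirst, pv_build_mem_keys, PySem.Dict.keys_empty]
      simp
  have hpw : (PySem.Set.ofList cands).Pairwise
      (fun a b => first.getD a 0 < first.getD b 0) := by
    refine List.Pairwise.imp_of_mem ?_ (pv_pairwise_idxOf cands)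
    intro a b ha hb hab
    have ha' : a ∈ cands := (PySem.Set.mem_ofList _ _).1 ha
    have hb' : b ∈ cands := (PySem.Set.mem_ofList _ _).1 hb
    rw [PySem.Dict.getD_eq_get?_getD, PySem.Dict.getD_eq_get?_getD, hfirst,
      pv_build_get?, pv_build_get?, if_pos ha', if_pos hb']
    simpa using hab
  exact (PySem.List.sorted_eq_of_perm_of_pairwise_lt _ _ _ hperm hpw).symm
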